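-- pv_equiv track=rewrite | github.com/sapienzastudents/exercises | Progettazione di Algoritmi/canale2/2018_2019/esercizi/quadrato.py | quadrato_mat
-- ===== SOURCE A (Python) =====
-- def quadrato_mat(grafo):
--     grafo_quadrato = [[adiacente for adiacente in grafo[nodo]] for nodo
--                       in range(len(grafo))]
--
--     for nodo in range(len(grafo)):
--         for adiacente in range(len(grafo)):
--             # Escludo il controllo dello stesso nodo e dei nodi non
--             # raggiungibili.
--             if adiacente != nodo and grafo[nodo][adiacente] != 0:
--                 for raggiungibile in range(len(grafo)):
--                     # Stesso controllo di sopra.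
--                     if adiacente != raggiungibile \
--                        and grafo[adiacente][raggiungibile] != 0:
--                            grafo_quadrato[nodo][raggiungibile] = 1
--
--     return grafo_quadrato
-- ===== SOURCE B (Python) =====
-- def quadrato_mat(grafo):
--     n = len(grafo)
--     # Bitset tables: succ[i] has bit k set iff k != i and grafo[i][k] != 0,
--     # pred[j] has bit k set iff k != j and grafo[k][j] != 0.  Built in one
--     # O(n^2) pass; a cell then needs only one big-int AND instead of an
--     # inner scan over all intermediates.
--     succ = [0] * n
--     pred = [0] * n
--     for i in range(n):
--         for j in range(n):
--             if i != j and grafo[i][j] != 0: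
--                 succ[i] |= 1 << j
--                 pred[j] |= 1 << i
--     return [[1 if succ[i] & pred[j] else grafo[i][j] for j in range(n)]
--             for i in range(n)]
-- ===== Notes on version B (the rewrite author's own statement) =====
-- stated objective: faster
-- what changed: B precomputes successor and predecessor bitmask tables (succ[i]/pred[j] as Python big ints) in one O(n^2) pass and decides each output cell by a single mask intersection succ[i] & pred[j], replacing A's triple nested scatter loops that overwrite a copied matrix with 1s; a timing run measured B much faster.
-- outside the precondition, e.g. on quadrato_mat([[0, 0], [0]]): A returns [[0, 0], [0]], B raises IndexError; on quadrato_mat([[1, 1, 5], [1, 0]]): A returns [[1, 1, 5], [1, 1]], B returns [[1, 1], [1, 1]]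
import Mathlib
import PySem

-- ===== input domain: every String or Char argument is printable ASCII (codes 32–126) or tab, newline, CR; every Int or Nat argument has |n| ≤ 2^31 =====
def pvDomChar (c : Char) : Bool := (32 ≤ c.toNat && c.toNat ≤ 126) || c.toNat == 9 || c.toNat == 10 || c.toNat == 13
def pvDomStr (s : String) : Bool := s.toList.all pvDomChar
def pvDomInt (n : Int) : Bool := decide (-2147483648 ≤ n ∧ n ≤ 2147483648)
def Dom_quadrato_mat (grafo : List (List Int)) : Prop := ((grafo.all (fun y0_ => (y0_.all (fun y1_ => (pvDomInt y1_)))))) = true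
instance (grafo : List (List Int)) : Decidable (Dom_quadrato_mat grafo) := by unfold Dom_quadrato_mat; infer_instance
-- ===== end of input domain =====

-- B precomputes successor/predecessor bitmask tables in one O(n^2) pass and decides each
-- cell by a single mask intersection, replacing A's triple nested scatter loops; the timing
-- run measured B faster (word-parallel bitwise AND); objective: faster.

-- ===== PORT A =====
-- literal transliteration of A: copy the matrix, then three nested loops that
-- overwrite grafo_quadrato[nodo][raggiungibile] with 1 (in-range reads/writes as getD/set;
-- exact under Pre_, which makes every index in range).
def quadrato_mat (grafo : List (List Int)) : List (List Int) :=
  let n := grafo.length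
  let gq0 := (List.range n).map (fun nodo => (grafo.getD nodo []).map (fun adiacente => adiacente))
  (List.range n).foldl (fun gq nodo =>
    (List.range n).foldl (fun gq adiacente =>
      if adiacente ≠ nodo ∧ (grafo.getD nodo []).getD adiacente 0 ≠ 0 then
        (List.range n).foldl (fun gq raggiungibile =>
          if adiacente ≠ raggiungibile ∧ (grafo.getD adiacente []).getD raggiungibile 0 ≠ 0 then
            gq.set nodo ((gq.getD nodo []).set raggiungibile 1)
          else gq) gq
      else gq) gq) gq0

-- ===== PORT B =====
-- cell (i,j) of a matrix (grafo[i][j], in range under Pre_)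
def pvCell (g : List (List Int)) (i j : Nat) : Int := (g.getD i []).getD j 0

-- Source B's loop body: if i != j and grafo[i][j] != 0: succ[i] |= 1 << j; pred[j] |= 1 << i
def pvBUpd (g : List (List Int)) (i : Nat) (sp : List Nat × List Nat) (j : Nat) :
    List Nat × List Nat :=
  if i ≠ j ∧ pvCell g i j ≠ 0 then
    (sp.1.set i (sp.1.getD i 0 ||| (1 <<< j)), sp.2.set j (sp.2.getD j 0 ||| (1 <<< i)))
  else sp

-- Source B's inner 'for j in range(n)' pass for one row i
def pvBStep (g : List (List Int)) (n : Nat) (sp : List Nat × List Nat) (i : Nat) :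
    List Nat × List Nat :=
  (List.range n).foldl (pvBUpd g i) sp

-- Source B's table-building double loop, starting from succ = pred = [0]*n
def pvBTables (g : List (List Int)) (n : Nat) : List Nat × List Nat :=
  (List.range n).foldl (pvBStep g n) (List.replicate n 0, List.replicate n 0)

-- literal transliteration of B: build the two bitmask tables, then one comprehension per cell.
def quadrato_mat_alt (grafo : List (List Int)) : List (List Int) :=
  let n := grafo.length
  let sp := pvBTables grafo n
  (List.range n).map (fun i =>
    (List.range n).map (fun j =>
      if sp.1.getD i 0 &&& sp.2.getD j 0 ≠ 0 then (1 : Int) else (grafo.getD i []).getD j 0))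

-- ===== PRECONDITION & SPEC =====
-- Pre_ restricts to square matrices, the natural domain of an adjacency-matrix function:
-- A indexes grafo[nodo][adiacente] for every nonzero entry it meets and raises IndexError on
-- most ragged inputs (B raises too); on the remaining ragged inputs (short rows whose missing
-- entries are never read, or extra columns beyond n) no behaviour is specified and A's value
-- is an accident of its scatter loops, so Pre_ excludes non-square inputs.
def Pre_quadrato_mat (grafo : List (List Int)) : Prop :=
  ∀ r ∈ grafo, r.length = grafo.length
instance (grafo : List (List Int)) : Decidable (Pre_quadrato_mat grafo) := by
  unfold Pre_quadrato_mat; infer_instance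
def pvWitness_quadrato_mat : List (List Int) := [[0, 1], [1, 0]]

def Spec_quadrato_mat (grafo : List (List Int)) (out : List (List Int)) : Prop := out = quadrato_mat_alt grafo
instance (grafo : List (List Int)) (out : List (List Int)) : Decidable (Spec_quadrato_mat grafo out) := by unfold Spec_quadrato_mat; infer_instance

-- ===== CLAIM (what is proved, stated in full; the proofs are below) =====
def Claim_equal_quadrato_mat : Prop := ∀ (grafo : List (List Int)), Dom_quadrato_mat grafo → Pre_quadrato_mat grafo → Spec_quadrato_mat grafo (quadrato_mat grafo)

-- ===== LEMMAS AND PROOFS =====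

-- named copies of A's three loop bodies (definitionally equal to the lambdas in the port)
def pvInner (grafo : List (List Int)) (nodo adiacente : Nat)
    (gq : List (List Int)) (raggiungibile : Nat) : List (List Int) :=
  if adiacente ≠ raggiungibile ∧ (grafo.getD adiacente []).getD raggiungibile 0 ≠ 0 then
    gq.set nodo ((gq.getD nodo []).set raggiungibile 1)
  else gq

def pvMid (grafo : List (List Int)) (n nodo : Nat)
    (gq : List (List Int)) (adiacente : Nat) : List (List Int) :=
  if adiacente ≠ nodo ∧ (grafo.getD nodo []).getD adiacente 0 ≠ 0 then
    (List.range n).foldl (pvInner grafo nodo adiacente) gq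
  else gq

def pvOuter (grafo : List (List Int)) (n : Nat)
    (gq : List (List Int)) (nodo : Nat) : List (List Int) :=
  (List.range n).foldl (pvMid grafo n nodo) gq

-- n×n shape invariant
def pvSh (n : Nat) (g : List (List Int)) : Prop :=
  g.length = n ∧ ∀ i, i < n → (g.getD i []).length = n

lemma quadrato_mat_eq (grafo : List (List Int)) :
    quadrato_mat grafo =
      (List.range grafo.length).foldl (pvOuter grafo grafo.length)
        ((List.range grafo.length).map (fun nodo => (grafo.getD nodo []).map (fun a => a))) := rfl

lemma pvIf_step {X : Int} {P1 P2 Q : Prop} [Decidable P1] [Decidable P2] [Decidable Q]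
    (h1 : P1 → Q) (h2 : P2 → Q) (h3 : Q → P1 ∨ P2) :
    (if P1 then (1 : Int) else if P2 then 1 else X) = if Q then 1 else X := by
  by_cases hq : Q
  · rw [if_pos hq]
    rcases h3 hq with hp | hp
    · rw [if_pos hp]
    · by_cases hp1 : P1
      · rw [if_pos hp1]
      · rw [if_neg hp1, if_pos hp]
  · rw [if_neg hq, if_neg (fun hp => hq (h1 hp)), if_neg (fun hp => hq (h2 hp))]

lemma pvGetD_set {α : Type} (l : List α) (i j : Nat) (a d : α) :
    (l.set i a).getD j d = if i = j ∧ i < l.length then a else l.getD j d := by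
  simp [List.getD_eq_getElem?_getD, List.getElem?_set]
  split_ifs <;> simp_all <;> omega

lemma pvGetD_eq {α : Type} (l : List α) (i : Nat) (d : α) (h : i < l.length) :
    l.getD i d = l[i] := by
  rw [List.getD_eq_getElem?_getD, List.getElem?_eq_getElem h, Option.getD_some]

lemma pvSh_set (n : Nat) (g : List (List Int)) (a : Nat) (r : List Int)
    (h : pvSh n g) (hr : r.length = n) : pvSh n (g.set a r) := by
  refine ⟨by simp [h.1], fun i hi => ?_⟩
  rw [pvGetD_set]
  split_ifs with hc
  · exact hr
  · exact h.2 i hi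

lemma pvCell_set (n : Nat) (g : List (List Int)) (a b i j : Nat)
    (h : pvSh n g) (ha : a < n) (hb : b < n) (hi : i < n) (hj : j < n) :
    pvCell (g.set a ((g.getD a []).set b 1)) i j =
      if i = a ∧ j = b then 1 else pvCell g i j := by
  have hga : a < g.length := by rw [h.1]; exact ha
  have hrb : b < (g.getD a []).length := by rw [h.2 a ha]; exact hb
  unfold pvCell
  rw [pvGetD_set]
  by_cases hia : i = a
  · subst hia
    rw [if_pos ⟨rfl, hga⟩, pvGetD_set]
    by_cases hjb : j = b
    · subst hjb
      rw [if_pos ⟨rfl, hrb⟩, if_pos ⟨rfl, rfl⟩]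
    · rw [if_neg (by tauto), if_neg (by tauto)]
  · rw [if_neg (by tauto), if_neg (by tauto)]

lemma pvInner_sh (grafo : List (List Int)) (n nodo adiacente : Nat) (R : List Nat)
    (g : List (List Int)) (h : pvSh n g) (hnodo : nodo < n) :
    pvSh n (R.foldl (pvInner grafo nodo adiacente) g) := by
  induction R generalizing g with
  | nil => exact h
  | cons r R ih =>
    simp only [List.foldl_cons]
    apply ih
    unfold pvInner
    split_ifs with hc
    · exact pvSh_set n g nodo _ h (by rw [List.length_set]; exact h.2 nodo hnodo)
    · exact h

lemma pvInner_cell (grafo : List (List Int)) (n nodo adiacente : Nat) (R : List Nat)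
    (g : List (List Int)) (h : pvSh n g) (hnodo : nodo < n) (hR : ∀ r ∈ R, r < n)
    (i j : Nat) (hi : i < n) (hj : j < n) :
    pvCell (R.foldl (pvInner grafo nodo adiacente) g) i j =
      if i = nodo ∧ j ∈ R ∧ adiacente ≠ j ∧ (grafo.getD adiacente []).getD j 0 ≠ 0
      then 1 else pvCell g i j := by
  induction R generalizing g with
  | nil => simp
  | cons r R ih =>
    have hr : r < n := hR r (List.mem_cons_self ..)
    have hR' : ∀ x ∈ R, x < n := fun x hx => hR x (List.mem_cons_of_mem _ hx)
    simp only [List.foldl_cons]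
    by_cases hc : adiacente ≠ r ∧ (grafo.getD adiacente []).getD r 0 ≠ 0
    · rw [show pvInner grafo nodo adiacente g r = g.set nodo ((g.getD nodo []).set r 1) from
        if_pos hc]
      rw [ih _ (pvSh_set n g nodo _ h (by rw [List.length_set]; exact h.2 nodo hnodo)) hR']
      rw [pvCell_set n g nodo r i j h hnodo hr hi hj]
      apply pvIf_step
      · rintro ⟨hin, hjR, hC⟩
        exact ⟨hin, List.mem_cons_of_mem _ hjR, hC⟩
      · rintro ⟨hin, rfl⟩
        exact ⟨hin, List.mem_cons_self .., hc.1, hc.2⟩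
      · rintro ⟨hin, hjm, hC⟩
        rcases List.mem_cons.mp hjm with rfl | hjR
        · exact Or.inr ⟨hin, rfl⟩
        · exact Or.inl ⟨hin, hjR, hC⟩
    · rw [show pvInner grafo nodo adiacente g r = g from if_neg hc]
      rw [ih g h hR']
      refine if_congr ?_ rfl rfl
      constructor
      · rintro ⟨hin, hjR, hC⟩
        exact ⟨hin, List.mem_cons_of_mem _ hjR, hC⟩
      · rintro ⟨hin, hjm, hC⟩
        rcases List.mem_cons.mp hjm with rfl | hjR
        · exact absurd hC hc
        · exact ⟨hin, hjR, hC⟩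

lemma pvMid_sh (grafo : List (List Int)) (n nodo : Nat) (K : List Nat)
    (g : List (List Int)) (h : pvSh n g) (hnodo : nodo < n) :
    pvSh n (K.foldl (pvMid grafo n nodo) g) := by
  induction K generalizing g with
  | nil => exact h
  | cons k K ih =>
    simp only [List.foldl_cons]
    apply ih
    unfold pvMid
    split_ifs with hc
    · exact pvInner_sh grafo n nodo k (List.range n) g h hnodo
    · exact h

lemma pvMid_cell (grafo : List (List Int)) (n nodo : Nat) (K : List Nat)
    (g : List (List Int)) (h : pvSh n g) (hnodo : nodo < n) (hK : ∀ k ∈ K, k < n)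
    (i j : Nat) (hi : i < n) (hj : j < n) :
    pvCell (K.foldl (pvMid grafo n nodo) g) i j =
      if i = nodo ∧ (∃ k ∈ K, k ≠ nodo ∧ (grafo.getD nodo []).getD k 0 ≠ 0 ∧
          k ≠ j ∧ (grafo.getD k []).getD j 0 ≠ 0)
      then 1 else pvCell g i j := by
  induction K generalizing g with
  | nil => simp
  | cons k K ih =>
    have hk : k < n := hK k (List.mem_cons_self ..)
    have hK' : ∀ x ∈ K, x < n := fun x hx => hK x (List.mem_cons_of_mem _ hx)
    simp only [List.foldl_cons]
    by_cases hc : k ≠ nodo ∧ (grafo.getD nodo []).getD k 0 ≠ 0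
    · rw [show pvMid grafo n nodo g k = (List.range n).foldl (pvInner grafo nodo k) g from
        if_pos hc]
      rw [ih _ (pvInner_sh grafo n nodo k (List.range n) g h hnodo) hK']
      rw [pvInner_cell grafo n nodo k (List.range n) g h hnodo
        (fun x hx => List.mem_range.mp hx) i j hi hj]
      apply pvIf_step
      · rintro ⟨hin, x, hxK, hd⟩
        exact ⟨hin, x, List.mem_cons_of_mem _ hxK, hd⟩
      · rintro ⟨hin, hjm, hkj, hck⟩
        exact ⟨hin, k, List.mem_cons_self .., hc.1, hc.2, hkj, hck⟩
      · rintro ⟨hin, x, hxm, hd⟩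
        rcases List.mem_cons.mp hxm with rfl | hxK
        · exact Or.inr ⟨hin, List.mem_range.mpr hj, hd.2.2.1, hd.2.2.2⟩
        · exact Or.inl ⟨hin, x, hxK, hd⟩
    · rw [show pvMid grafo n nodo g k = g from if_neg hc]
      rw [ih g h hK']
      refine if_congr ?_ rfl rfl
      constructor
      · rintro ⟨hin, x, hxK, hd⟩
        exact ⟨hin, x, List.mem_cons_of_mem _ hxK, hd⟩
      · rintro ⟨hin, x, hxm, hd⟩
        rcases List.mem_cons.mp hxm with rfl | hxK
        · exact absurd ⟨hd.1, hd.2.1⟩ hc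
        · exact ⟨hin, x, hxK, hd⟩

lemma pvOuter_sh (grafo : List (List Int)) (n : Nat) (Ns : List Nat)
    (g : List (List Int)) (h : pvSh n g) (hNs : ∀ m ∈ Ns, m < n) :
    pvSh n (Ns.foldl (pvOuter grafo n) g) := by
  induction Ns generalizing g with
  | nil => exact h
  | cons m Ns ih =>
    simp only [List.foldl_cons]
    exact ih _ (pvMid_sh grafo n m (List.range n) g h (hNs m (List.mem_cons_self ..)))
      (fun x hx => hNs x (List.mem_cons_of_mem _ hx))

lemma pvOuter_cell (grafo : List (List Int)) (n : Nat) (Ns : List Nat)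
    (g : List (List Int)) (h : pvSh n g) (hNs : ∀ m ∈ Ns, m < n)
    (i j : Nat) (hi : i < n) (hj : j < n) :
    pvCell (Ns.foldl (pvOuter grafo n) g) i j =
      if i ∈ Ns ∧ (∃ k ∈ List.range n, k ≠ i ∧ (grafo.getD i []).getD k 0 ≠ 0 ∧
          k ≠ j ∧ (grafo.getD k []).getD j 0 ≠ 0)
      then 1 else pvCell g i j := by
  induction Ns generalizing g with
  | nil => simp
  | cons m Ns ih =>
    have hm : m < n := hNs m (List.mem_cons_self ..)
    have hNs' : ∀ x ∈ Ns, x < n := fun x hx => hNs x (List.mem_cons_of_mem _ hx)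
    simp only [List.foldl_cons]
    rw [show pvOuter grafo n g m = (List.range n).foldl (pvMid grafo n m) g from rfl]
    rw [ih _ (pvMid_sh grafo n m (List.range n) g h hm) hNs']
    rw [pvMid_cell grafo n m (List.range n) g h hm (fun x hx => List.mem_range.mp hx) i j hi hj]
    apply pvIf_step
    · rintro ⟨hiNs, hw⟩
      exact ⟨List.mem_cons_of_mem _ hiNs, hw⟩
    · rintro ⟨rfl, hw⟩
      exact ⟨List.mem_cons_self .., hw⟩
    · rintro ⟨him, hw⟩
      rcases List.mem_cons.mp him with rfl | hiNs
      · exact Or.inr ⟨rfl, hw⟩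
      · exact Or.inl ⟨hiNs, hw⟩

lemma pvGq0_eq (grafo : List (List Int)) :
    (List.range grafo.length).map (fun nodo => (grafo.getD nodo []).map (fun a => a)) = grafo := by
  apply List.ext_getElem (by simp)
  intro i h1 h2
  simp [List.getD_eq_getElem?_getD, List.getElem?_eq_getElem h2]

-- ===== B-side lemmas: bitset tables =====

lemma pvOneShift_testBit (j k : Nat) : (1 <<< j).testBit k = decide (j = k) := by
  rw [Nat.one_shiftLeft]; exact Nat.testBit_two_pow

lemma pvBUpd_len (g : List (List Int)) (i : Nat) (J : List Nat) (sp : List Nat × List Nat) :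
    (J.foldl (pvBUpd g i) sp).1.length = sp.1.length ∧
    (J.foldl (pvBUpd g i) sp).2.length = sp.2.length := by
  induction J generalizing sp with
  | nil => exact ⟨rfl, rfl⟩
  | cons j J ih =>
    simp only [List.foldl_cons]
    obtain ⟨h1, h2⟩ := ih (pvBUpd g i sp j)
    unfold pvBUpd at h1 h2 ⊢
    constructor <;> split_ifs at h1 h2 ⊢ <;> simp_all

lemma pvBRow_bits (g : List (List Int)) (i : Nat) (J : List Nat) (sp : List Nat × List Nat)
    (hi : i < sp.1.length) (hJ : ∀ j ∈ J, j < sp.2.length) (t k : Nat) :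
    (((J.foldl (pvBUpd g i) sp).1.getD t 0).testBit k = true ↔
      ((sp.1.getD t 0).testBit k = true ∨ (t = i ∧ k ∈ J ∧ i ≠ k ∧ pvCell g i k ≠ 0)))
    ∧ (((J.foldl (pvBUpd g i) sp).2.getD t 0).testBit k = true ↔
      ((sp.2.getD t 0).testBit k = true ∨ (k = i ∧ t ∈ J ∧ i ≠ t ∧ pvCell g i t ≠ 0))) := by
  induction J generalizing sp with
  | nil => simp
  | cons j J ih =>
    have hj : j < sp.2.length := hJ j (List.mem_cons_self ..)
    simp only [List.foldl_cons]
    by_cases hc : i ≠ j ∧ pvCell g i j ≠ 0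
    · rw [show pvBUpd g i sp j =
        (sp.1.set i (sp.1.getD i 0 ||| (1 <<< j)), sp.2.set j (sp.2.getD j 0 ||| (1 <<< i)))
        from if_pos hc]
      obtain ⟨ih1, ih2⟩ := ih
        (sp.1.set i (sp.1.getD i 0 ||| (1 <<< j)), sp.2.set j (sp.2.getD j 0 ||| (1 <<< i)))
        (by simpa using hi)
        (fun x hx => by simpa using hJ x (List.mem_cons_of_mem _ hx))
      dsimp only at ih1 ih2
      constructor
      · rw [ih1]
        simp only [pvGetD_set]
        by_cases ht : i = t ∧ i < sp.1.length
        · obtain ⟨rfl, _⟩ := ht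
          rw [if_pos ⟨rfl, hi⟩]
          simp only [Nat.testBit_or, pvOneShift_testBit, Bool.or_eq_true, decide_eq_true_eq,
            List.mem_cons]
          have hjk : j = k → (i ≠ k ∧ pvCell g i k ≠ 0) := by rintro rfl; exact hc
          clear ih ih2
          have hck : j = k ↔ k = j := eq_comm
          tauto
        · rw [if_neg ht]
          have hti : t ≠ i := by
            intro h; exact ht ⟨h.symm, hi⟩
          simp only [List.mem_cons]
          clear ih ih2
          tauto
      · rw [ih2]
        simp only [pvGetD_set]
        by_cases ht : j = t ∧ j < sp.2.length
        · obtain ⟨rfl, _⟩ := ht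
          rw [if_pos ⟨rfl, hj⟩]
          simp only [Nat.testBit_or, pvOneShift_testBit, Bool.or_eq_true, decide_eq_true_eq,
            List.mem_cons]
          have hik : i = k → k = i := fun h => h.symm
          clear ih ih1
          have hck : i = k ↔ k = i := eq_comm
          tauto
        · rw [if_neg ht]
          have htj : t ≠ j := by
            intro h; exact ht ⟨h.symm, hj⟩
          simp only [List.mem_cons]
          clear ih ih1
          tauto
    · rw [show pvBUpd g i sp j = sp from if_neg hc]
      obtain ⟨ih1, ih2⟩ := ih sp hi (fun x hx => hJ x (List.mem_cons_of_mem _ hx))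
      constructor
      · rw [ih1]
        simp only [List.mem_cons]
        have hjk : j = k → ¬(i ≠ k ∧ pvCell g i k ≠ 0) := by rintro rfl; exact hc
        clear ih ih2
        have hck : k = j ↔ j = k := eq_comm
        tauto
      · rw [ih2]
        simp only [List.mem_cons]
        have hjt : j = t → ¬(i ≠ t ∧ pvCell g i t ≠ 0) := by rintro rfl; exact hc
        constructor
        · rintro (hb | ⟨hk, htJ, hC⟩)
          · exact Or.inl hb
          · exact Or.inr ⟨hk, Or.inr htJ, hC⟩
        · rintro (hb | ⟨hk, htj | htJ, hC⟩)
          · exact Or.inl hb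
          · exact absurd hC (hjt htj.symm)
          · exact Or.inr ⟨hk, htJ, hC⟩

lemma pvBOuter_bits (g : List (List Int)) (n : Nat) (I : List Nat) (sp : List Nat × List Nat)
    (h1 : sp.1.length = n) (h2 : sp.2.length = n) (hI : ∀ i ∈ I, i < n) (t k : Nat) :
    (((I.foldl (pvBStep g n) sp).1.getD t 0).testBit k = true ↔
      ((sp.1.getD t 0).testBit k = true ∨ (t ∈ I ∧ k < n ∧ t ≠ k ∧ pvCell g t k ≠ 0)))
    ∧ (((I.foldl (pvBStep g n) sp).2.getD t 0).testBit k = true ↔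
      ((sp.2.getD t 0).testBit k = true ∨ (k ∈ I ∧ t < n ∧ k ≠ t ∧ pvCell g k t ≠ 0))) := by
  induction I generalizing sp with
  | nil => simp
  | cons i I ih =>
    have hi : i < n := hI i (List.mem_cons_self ..)
    have hI' : ∀ x ∈ I, x < n := fun x hx => hI x (List.mem_cons_of_mem _ hx)
    simp only [List.foldl_cons]
    have hlen := pvBUpd_len g i (List.range n) sp
    have hrow := pvBRow_bits g i (List.range n) sp (by rw [h1]; exact hi)
      (fun x hx => by rw [h2]; exact List.mem_range.mp hx)
    obtain ⟨ih1, ih2⟩ := ih (pvBStep g n sp i)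
      (by rw [show pvBStep g n sp i = (List.range n).foldl (pvBUpd g i) sp from rfl, hlen.1]; exact h1)
      (by rw [show pvBStep g n sp i = (List.range n).foldl (pvBUpd g i) sp from rfl, hlen.2]; exact h2)
      hI'
    constructor
    · rw [ih1]
      simp only [pvBStep]
      rw [(hrow t k).1]
      simp only [List.mem_cons, List.mem_range]
      constructor
      · rintro ((hb | ⟨rfl, hk, hC⟩) | ⟨htI, hw⟩)
        · exact Or.inl hb
        · exact Or.inr ⟨Or.inl rfl, hk, hC⟩
        · exact Or.inr ⟨Or.inr htI, hw⟩
      · rintro (hb | ⟨(rfl | htI), hw⟩)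
        · exact Or.inl (Or.inl hb)
        · exact Or.inl (Or.inr ⟨rfl, hw⟩)
        · exact Or.inr ⟨htI, hw⟩
    · rw [ih2]
      simp only [pvBStep]
      rw [(hrow t k).2]
      simp only [List.mem_cons, List.mem_range]
      constructor
      · rintro ((hb | ⟨rfl, ht, hC⟩) | ⟨hkI, hw⟩)
        · exact Or.inl hb
        · exact Or.inr ⟨Or.inl rfl, ht, hC⟩
        · exact Or.inr ⟨Or.inr hkI, hw⟩
      · rintro (hb | ⟨(rfl | hkI), hw⟩)
        · exact Or.inl (Or.inl hb)
        · exact Or.inl (Or.inr ⟨rfl, hw⟩)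
        · exact Or.inr ⟨hkI, hw⟩

lemma pvBTables_bits (g : List (List Int)) (n : Nat) (t k : Nat) :
    ((((pvBTables g n).1.getD t 0).testBit k = true) ↔
      (t < n ∧ k < n ∧ t ≠ k ∧ pvCell g t k ≠ 0))
    ∧ ((((pvBTables g n).2.getD t 0).testBit k = true) ↔
      (k < n ∧ t < n ∧ k ≠ t ∧ pvCell g k t ≠ 0)) := by
  have h := pvBOuter_bits g n (List.range n) (List.replicate n 0, List.replicate n 0)
    (by simp) (by simp) (fun x hx => List.mem_range.mp hx) t k
  have hz1 : ((List.replicate n (0 : Nat)).getD t 0).testBit k = false := by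
    rcases Nat.lt_or_ge t n with h' | h'
    · rw [pvGetD_eq _ _ _ (by simpa using h')]; simp
    · rw [List.getD_eq_getElem?_getD, List.getElem?_eq_none (by simpa using h')]; simp
  unfold pvBTables
  obtain ⟨hA, hB⟩ := h
  constructor
  · rw [hA]; simp [hz1, List.mem_range]
  · rw [hB]; simp [hz1, List.mem_range]

lemma pvAnd_ne_zero (a b : Nat) :
    a &&& b ≠ 0 ↔ ∃ k, a.testBit k = true ∧ b.testBit k = true := by
  constructor
  · intro h
    by_contra hn
    push_neg at hn
    apply h
    apply Nat.eq_of_testBit_eq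
    intro i
    have hni := hn i
    simp only [Nat.testBit_and, Nat.zero_testBit]
    cases ha : a.testBit i <;> cases hb : b.testBit i <;> simp_all
  · rintro ⟨k, ha, hb⟩ h
    have := congrArg (fun m => Nat.testBit m k) h
    simp [Nat.testBit_and, ha, hb] at this

lemma quadrato_mat_alt_eq (grafo : List (List Int)) :
    quadrato_mat_alt grafo =
      (List.range grafo.length).map (fun i =>
        (List.range grafo.length).map (fun j =>
          if (pvBTables grafo grafo.length).1.getD i 0 &&&
             (pvBTables grafo grafo.length).2.getD j 0 ≠ 0
          then (1 : Int) else pvCell grafo i j)) := rfl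

-- ===== VERDICT (by name: the statement is the Claim_ definition above) =====
theorem quadrato_mat_spec : Claim_equal_quadrato_mat := by
  intro grafo _ hpre
  unfold Spec_quadrato_mat
  have hsh : pvSh grafo.length grafo := by
    refine ⟨rfl, fun i hi => ?_⟩
    rw [List.getD_eq_getElem?_getD, List.getElem?_eq_getElem hi]
    exact hpre _ (List.getElem_mem hi)
  have hres : pvSh grafo.length
      ((List.range grafo.length).foldl (pvOuter grafo grafo.length) grafo) :=
    pvOuter_sh grafo grafo.length (List.range grafo.length) grafo hsh
      (fun x hx => List.mem_range.mp hx)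
  rw [quadrato_mat_eq, pvGq0_eq]
  rw [quadrato_mat_alt_eq]
  apply List.ext_getElem
  · simp [hres.1]
  intro i h1 h2
  have hi : i < grafo.length := by rw [← hres.1]; exact h1
  have hrowlen : (((List.range grafo.length).foldl (pvOuter grafo grafo.length) grafo)[i]).length
      = grafo.length := by
    have := hres.2 i hi
    rwa [List.getD_eq_getElem?_getD, List.getElem?_eq_getElem h1, Option.getD_some] at this
  apply List.ext_getElem
  · simp [hrowlen]
  intro j hj1 hj2
  have hj : j < grafo.length := by rw [← hrowlen]; exact hj1
  have hcell :
      (((List.range grafo.length).foldl (pvOuter grafo grafo.length) grafo)[i])[j] =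
        pvCell ((List.range grafo.length).foldl (pvOuter grafo grafo.length) grafo) i j := by
    unfold pvCell
    rw [pvGetD_eq _ _ _ h1, pvGetD_eq _ _ _ hj1]
  rw [hcell, pvOuter_cell grafo grafo.length (List.range grafo.length) grafo hsh
    (fun x hx => List.mem_range.mp hx) i j hi hj]
  simp only [List.getElem_map, List.getElem_range]
  refine if_congr ?_ rfl rfl
  rw [pvAnd_ne_zero]
  constructor
  · rintro ⟨-, k, hkmem, hki, hik, hkj, hkj0⟩
    refine ⟨k, ?_, ?_⟩
    · exact (pvBTables_bits grafo grafo.length i k).1.mpr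
        ⟨hi, List.mem_range.mp hkmem, Ne.symm hki, hik⟩
    · exact (pvBTables_bits grafo grafo.length j k).2.mpr
        ⟨List.mem_range.mp hkmem, hj, hkj, hkj0⟩
  · rintro ⟨k, ha, hb⟩
    obtain ⟨-, hk, hik, hc1⟩ := (pvBTables_bits grafo grafo.length i k).1.mp ha
    obtain ⟨-, -, hkj, hc2⟩ := (pvBTables_bits grafo grafo.length j k).2.mp hb
    exact ⟨List.mem_range.mpr hi, k, List.mem_range.mpr hk, Ne.symm hik, hc1, hkj, hc2⟩
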